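-- pv_equiv track=rewrite | github.com/hamowanyi/bishe-191220092 | proj1/prompt_base.py | get_first_char
-- ===== SOURCE A (Python) =====
-- import string
--
-- def get_first_char(str):
--     for i in range(len(str)):
--         if str[i] != ' ':
--             if str[i] in string.ascii_uppercase:
--                 return True, False
--             elif str[i] in string.ascii_lowercase:
--                 return False, True
--     return False, False
-- ===== SOURCE B (Python) =====
-- import string
--
-- def get_first_char(str):
--     res = (False, False)
--     for c in reversed(str):
--         if c in string.ascii_uppercase:
--             res = (True, False)
--         elif c in string.ascii_lowercase:
--             res = (False, True)
--     return res
-- ===== Notes on version B (the rewrite author's own statement) =====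
-- stated objective: alternative
-- what changed: Replaces the left-to-right index scan with early return by a right-to-left fold over the string with a last-letter-wins accumulator (the last update in reversed order is the first letter in the original order), no early exit.
import Mathlib
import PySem

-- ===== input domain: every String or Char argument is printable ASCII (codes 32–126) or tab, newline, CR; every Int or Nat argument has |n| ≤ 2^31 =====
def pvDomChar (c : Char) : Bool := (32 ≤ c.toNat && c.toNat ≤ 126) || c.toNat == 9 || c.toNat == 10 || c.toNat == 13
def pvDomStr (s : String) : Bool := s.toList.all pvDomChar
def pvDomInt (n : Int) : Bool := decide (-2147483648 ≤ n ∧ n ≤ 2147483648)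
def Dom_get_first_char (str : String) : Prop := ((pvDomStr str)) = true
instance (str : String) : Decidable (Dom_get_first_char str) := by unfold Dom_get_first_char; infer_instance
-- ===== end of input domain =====

-- B replaces A's left-to-right scan with early return by a right-to-left fold with a
-- last-letter-wins accumulator (objective: alternative; same O(n) cost, no early exit).

-- ===== PORT A =====
-- A's for-loop over indices with early return, as structural recursion over the characters
-- ('c in string.ascii_uppercase' for a single char is exactly the ASCII range test).
def getFirstCharLoop : List Char → Bool × Bool
  | [] => (false, false)
  | c :: rest =>
    if c ≠ ' ' then
      if 'A' ≤ c ∧ c ≤ 'Z' then (true, false)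
      else if 'a' ≤ c ∧ c ≤ 'z' then (false, true)
      else getFirstCharLoop rest
    else getFirstCharLoop rest

def get_first_char (str : String) : Bool × Bool := getFirstCharLoop str.toList

-- ===== PORT B =====
-- Source B's 'for c in reversed(str)' loop with accumulator res, as a fold over the reversed
-- character list; the membership tests are the same ASCII range tests.
def get_first_char_alt (str : String) : Bool × Bool :=
  str.toList.reverse.foldl
    (fun res c =>
      if 'A' ≤ c ∧ c ≤ 'Z' then (true, false)
      else if 'a' ≤ c ∧ c ≤ 'z' then (false, true)
      else res)
    (false, false)

-- ===== PRECONDITION & SPEC =====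
def Spec_get_first_char (str : String) (out : Bool × Bool) : Prop := out = get_first_char_alt str
instance (str : String) (out : Bool × Bool) : Decidable (Spec_get_first_char str out) := by unfold Spec_get_first_char; infer_instance

-- ===== CLAIM =====
def Claim_equal_get_first_char : Prop := ∀ (str : String), Dom_get_first_char str → Spec_get_first_char str (get_first_char str)

-- ===== LEMMAS AND PROOFS =====
-- A's early-return scan equals the right fold (= fold over the reversed list):
-- the first letter found left-to-right is the last accumulator update right-to-left.
theorem getFirstCharLoop_eq_foldr (l : List Char) :
    getFirstCharLoop l =
      l.foldr
        (fun c res =>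
          if 'A' ≤ c ∧ c ≤ 'Z' then (true, false)
          else if 'a' ≤ c ∧ c ≤ 'z' then (false, true)
          else res)
        (false, false) := by
  induction l with
  | nil => rfl
  | cons c rest ih =>
    simp only [getFirstCharLoop, List.foldr]
    by_cases hs : c = ' '
    · subst hs
      have hu : ¬('A' ≤ ' ' ∧ ' ' ≤ 'Z') := by decide
      have hl : ¬('a' ≤ ' ' ∧ ' ' ≤ 'z') := by decide
      simp [hu, hl, ih]
    · by_cases hu : 'A' ≤ c ∧ c ≤ 'Z'
      · simp [hs, hu]
      · by_cases hl : 'a' ≤ c ∧ c ≤ 'z'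
        · simp [hs, hu, hl]
        · simp [hs, hu, hl, ih]

-- ===== VERDICT =====
theorem get_first_char_spec : Claim_equal_get_first_char := by
  intro str _
  unfold Spec_get_first_char get_first_char get_first_char_alt
  rw [List.foldl_reverse]
  exact getFirstCharLoop_eq_foldr str.toList
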